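-- pv_equiv track=rewrite | github.com/meehdii18/super-connect-x | src/console_connect_x.py | check_row
-- ===== SOURCE A (Python) =====
-- grid_type = list[list[int]]  # Définition du type grid (tableau d'entiers en deux dimensions)
--
-- def check_row(required_coins: int, grid: grid_type, player: int) -> int:
--     """
--     Fonction qui vérifie si il y a une victoire du joueur spécifié sur les lignes.
--     :param required_coins: Le nombre de jetons à aligner pour gagner.
--     :param grid: La grille où chercher une victoire.
--     :param player: Le joueur pour qui chercher une victoire.
--     :return: player si une victoire est trouvée ; 0 sinon.
--     """
--     board_width = len(grid[0])  # Récupération de la largeur de la grille passée en paramètre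
--     board_height = len(grid)  # Récupération de la hauteur de la grille passée en paramètre
--     row = 0  # On initialise la ligne à 0
--     count = 0  # On initialise le compte de jetons alignés à 0
--     while (row < board_height  # On vérifie qu'on ne sort pas de la grille
--            and count < required_coins):  # On vérifie que l'on n'a pas encore trouvé de victoire
--         col = 0  # On initialise la colonne à 0
--         count = 0  # On initialise le compte de jetons alignés à 0
--         while (col < board_width  # On vérifie qu'on ne sort pas de la grille
--                and count < required_coins  # On vérifie que l'on n'a pas encore trouvé de victoire
--                and board_width - col >= required_coins - count):  # On vérifie en fonction du compte actuel qu'une victoire est encore possible sur cette ligne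
--             if grid[row][col] == player:  # Cas où l'emplacement actuel contient un jeton du joueur spécifié
--                 count += 1  # On ajoute 1 au compte
--             else:  # Cas où l'emplacement actuel ne contient pas un jeton du joueur spécifié
--                 count = 0  # on réinitialise le compte à 0
--             # endif
--             col += 1  # On passe à la colonne suivante
--         # endwhile
--         row += 1  # On passe à la ligne suivante
--     # endwhile
--     if count == required_coins:  # Cas où une victoire a été trouvée
--         winner = player  # On assigne l'entier correspondant au joueur à la variable indiquant la victoire
--     else:  # Cas où aucune victoire n'a été trouvée
--         winner = 0  # On assigne 0 à la variable indiquant la victoire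
--     # endif
--     return winner  # On renvoie la variable indiquant la victoire
-- ===== SOURCE B (Python) =====
-- def check_row(required_coins, grid, player):
--     """Sliding-window search: some length-required_coins window of a row of
--     the width-wide board has all its cells belonging to player."""
--     width = len(grid[0])
--     for row in grid:
--         for start in range(width - required_coins + 1):
--             if all(row[start + i] == player for i in range(required_coins)):
--                 return player
--     return 0
-- ===== Notes on version B (the rewrite author's own statement) =====
-- stated objective: simpler
-- what changed: Replaces A's pair of nested while loops with carried run-count state and a reachability-pruning condition by a direct sliding-window search over the board (for each start position, all cells of the window equal player); Pre_ excludes the empty grid (A raises IndexError at grid[0]), negative required_coins (outside the natural domain of a win-length), and grids with a row shorter than the first row's width reachable by the scan (A can raise IndexError mid-scan there).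
-- outside the precondition, e.g. on check_row(-1, [[1]], 1): A returns 0, B returns 1; on check_row(2, [[1, 1], [0]], 1): A returns 1, B returns 1
import Mathlib
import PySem

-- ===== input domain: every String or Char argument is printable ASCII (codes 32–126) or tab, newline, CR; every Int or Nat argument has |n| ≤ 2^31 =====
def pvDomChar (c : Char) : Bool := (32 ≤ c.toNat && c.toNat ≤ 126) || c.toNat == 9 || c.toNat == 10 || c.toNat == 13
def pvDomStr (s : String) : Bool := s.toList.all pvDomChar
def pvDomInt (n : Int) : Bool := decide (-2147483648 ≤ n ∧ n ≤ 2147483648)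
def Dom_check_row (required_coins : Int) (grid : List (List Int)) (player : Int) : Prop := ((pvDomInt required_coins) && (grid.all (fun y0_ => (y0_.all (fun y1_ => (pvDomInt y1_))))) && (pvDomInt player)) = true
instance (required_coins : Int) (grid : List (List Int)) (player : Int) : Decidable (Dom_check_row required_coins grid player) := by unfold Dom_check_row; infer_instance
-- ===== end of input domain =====

-- B replaces A's nested while loops (carried run count + pruning) by a sliding-window
-- search over the board; objective: simpler. Equivalence is proved on non-empty grids
-- whose rows are at least as long as the board width, with required_coins ≥ 0 (Pre_ below).

-- ===== PORT A =====
-- inner while loop: col/count scan of one row; grid[row][col] is ported as getD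
-- (exact here: inside Pre_ the loop guard keeps col < board_width = row length).
-- The fuel argument (W at the call site) only bounds the iteration count; the
-- col < W guard always stops the loop before the fuel runs out.
def pvInnerA (rc player : Int) (row : List Int) (W : Nat) : Nat → Nat → Nat → Nat
  | 0, _, count => count
  | fuel + 1, col, count =>
    if col < W ∧ (count : Int) < rc ∧ (W : Int) - (col : Int) ≥ rc - (count : Int) then
      if row.getD col 0 = player then
        pvInnerA rc player row W fuel (col + 1) (count + 1)
      else
        pvInnerA rc player row W fuel (col + 1) 0
    else count

-- outer while loop over rows, carrying count between rows as A does (fuel = H)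
def pvOuterA (rc player : Int) (grid : List (List Int)) (W H : Nat) : Nat → Nat → Nat → Nat
  | 0, _, count => count
  | fuel + 1, rowIdx, count =>
    if rowIdx < H ∧ (count : Int) < rc then
      pvOuterA rc player grid W H fuel (rowIdx + 1)
        (pvInnerA rc player (grid.getD rowIdx []) W W 0 0)
    else count

-- board_width = len(grid[0]) (Pre_ excludes the empty grid: IndexError), board_height = len(grid)
def check_row (required_coins : Int) (grid : List (List Int)) (player : Int) : Int :=
  if ((pvOuterA required_coins player grid (grid.headD []).length grid.length
        grid.length 0 0 : Nat) : Int) = required_coins then player else 0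

-- ===== PORT B =====
-- all(row[start + i] == player for i in range(required_coins)); inside Pre_ the indices
-- produced by the two ranges are always valid (start + i < width ≤ len(row)), so
-- row[start + i] is ported exactly as getD on the nonnegative index (start + i).toNat.
def pvAllB (row : List Int) (player start : Int) : List Int → Bool
  | [] => true
  | i :: rest =>
    if row.getD (start + i).toNat 0 == player then pvAllB row player start rest else false

-- for start in range(width - required_coins + 1): … return player on first match
def pvScanStartsB (row : List Int) (player rc : Int) : List Int → Bool
  | [] => false
  | s :: rest =>
    if pvAllB row player s (PySem.List.pyRange 0 rc 1) then true
    else pvScanStartsB row player rc rest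

-- for row in grid: window scan of that row (the start range is the same for every row)
def pvRowsB (rc player : Int) (starts : List Int) : List (List Int) → Int
  | [] => 0
  | row :: rest =>
    if pvScanStartsB row player rc starts then player
    else pvRowsB rc player starts rest

-- width = len(grid[0]) (Pre_ excludes the empty grid, on which Python B raises like A)
def check_row_alt (required_coins : Int) (grid : List (List Int)) (player : Int) : Int :=
  pvRowsB required_coins player
    (PySem.List.pyRange 0 (((grid.headD []).length : Int) - required_coins + 1) 1) grid

-- ===== PRECONDITION & SPEC =====
-- Pre_ excludes: the empty grid, on which A raises IndexError at len(grid[0]); negative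
-- required_coins, outside the natural domain of a win-length (A returns 0 there, B finds a
-- trivial empty window); and (when required_coins fits in the board width) grids with a row
-- shorter than the first row's width, on which A's scan can raise IndexError mid-row.
def Pre_check_row (required_coins : Int) (grid : List (List Int)) (player : Int) : Prop :=
  grid ≠ [] ∧ 0 ≤ required_coins ∧
    ((∀ row ∈ grid, (grid.headD []).length ≤ row.length) ∨
      (((grid.headD []).length : Int) < required_coins))
instance (required_coins : Int) (grid : List (List Int)) (player : Int) : Decidable (Pre_check_row required_coins grid player) := by unfold Pre_check_row; infer_instance
def pvWitness_check_row : Int × List (List Int) × Int := (2, [[0, 1], [1, 1]], 1)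

def Spec_check_row (required_coins : Int) (grid : List (List Int)) (player : Int) (out : Int) : Prop := out = check_row_alt required_coins grid player
instance (required_coins : Int) (grid : List (List Int)) (player : Int) (out : Int) : Decidable (Spec_check_row required_coins grid player out) := by unfold Spec_check_row; infer_instance

-- ===== CLAIM (what is proved, stated in full; the proofs are below) =====
def Claim_equal_check_row : Prop := ∀ (required_coins : Int) (grid : List (List Int)) (player : Int), Dom_check_row required_coins grid player → Pre_check_row required_coins grid player → Spec_check_row required_coins grid player (check_row required_coins grid player)
-- ===== LEMMAS AND PROOFS =====

-- a horizontal win of length r for p in a single row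
def winRow (r : Nat) (p : Int) (row : List Int) : Prop :=
  ∃ s : Nat, (row.drop s).take r = List.replicate r p

-- any cell covered by a winning window holds p
lemma winRow_cell {r : Nat} {p : Int} {row : List Int} {s i : Nat}
    (hw : (row.drop s).take r = List.replicate r p) (hi : i < r) :
    row[s + i]? = some p := by
  have h1 : ((row.drop s).take r)[i]? = some p := by
    rw [hw]; simp [hi]
  rwa [List.getElem?_take, if_pos hi, List.getElem?_drop] at h1

-- a (non-trivial) winning window fits inside the row
lemma winRow_len {r : Nat} {p : Int} {row : List Int} {s : Nat} (hr : 1 ≤ r)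
    (hw : (row.drop s).take r = List.replicate r p) : s + r ≤ row.length := by
  have := congrArg List.length hw
  simp [List.length_take, List.length_drop, List.length_replicate] at this
  omega

lemma innerA_le (rc p : Int) (row : List Int) (W : Nat) :
    ∀ fuel col count : Nat, (count : Int) ≤ rc →
      ((pvInnerA rc p row W fuel col count : Nat) : Int) ≤ rc := by
  intro fuel
  induction fuel with
  | zero =>
    intro col count hc
    exact hc
  | succ n ih =>
    intro col count hc
    rw [pvInnerA]
    split_ifs with h h2
    · exact ih _ _ (by push_cast; omega)
    · exact ih _ _ (by push_cast; omega)
    · exact hc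

-- the inner loop only reads cells with col < W
lemma innerA_congr (rc p : Int) (row row2 : List Int) (W : Nat)
    (hagree : ∀ c : Nat, c < W → row.getD c 0 = row2.getD c 0) :
    ∀ fuel col count : Nat,
      pvInnerA rc p row W fuel col count = pvInnerA rc p row2 W fuel col count := by
  intro fuel
  induction fuel with
  | zero => intro col count; rfl
  | succ n ih =>
    intro col count
    rw [pvInnerA, pvInnerA]
    by_cases hguard : col < W ∧ (count : Int) < rc ∧
        (W : Int) - (col : Int) ≥ rc - (count : Int)
    · rw [if_pos hguard, if_pos hguard, hagree col hguard.1]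
      by_cases hp : row2.getD col 0 = p
      · rw [if_pos hp, if_pos hp, ih]
      · rw [if_neg hp, if_neg hp, ih]
    · rw [if_neg hguard, if_neg hguard]

lemma innerA_iff (r : Nat) (p : Int) (row : List Int) :
    ∀ fuel col count : Nat, row.length - col ≤ fuel → 1 ≤ r → count ≤ col →
      col ≤ row.length → count ≤ r →
      (row.drop (col - count)).take count = List.replicate count p →
      (((pvInnerA (r : Int) p row row.length fuel col count : Nat) : Int) = (r : Int) ↔
        ∃ s : Nat, col - count ≤ s ∧ (row.drop s).take r = List.replicate r p) := by
  intro fuel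
  induction fuel with
  | zero =>
    intro col count hf hr hcc hcol hcr hrun
    show ((count : Nat) : Int) = (r : Int) ↔ _
    constructor
    · intro hc
      have hcr' : count = r := by exact_mod_cast hc
      exact ⟨col - count, le_refl _, by rw [← hcr']; exact hrun⟩
    · rintro ⟨s, hs, hw⟩
      have hlen := winRow_len hr hw
      have : count = r := by omega
      exact_mod_cast congrArg (fun n => ((n : Nat) : Int)) this
  | succ n ih =>
    intro col count hf hr hcc hcol hcr hrun
    rw [pvInnerA]
    by_cases hguard : col < row.length ∧ (count : Int) < (r : Int) ∧
        ((row.length : Nat) : Int) - (col : Int) ≥ (r : Int) - (count : Int)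
    · rw [if_pos hguard]
      obtain ⟨hlt, hcltr, hprune⟩ := hguard
      have hcell : row.getD col 0 = row[col]'hlt := List.getD_eq_getElem row 0 hlt
      by_cases hp : row.getD col 0 = p
      · rw [if_pos hp]
        have hrun' : (row.drop (col + 1 - (count + 1))).take (count + 1) =
            List.replicate (count + 1) p := by
          have hix : (col + 1 - (count + 1)) = col - count := by omega
          rw [hix]
          have hgt : (row.drop (col - count))[count]? = some p := by
            rw [List.getElem?_drop]
            have hix2 : col - count + count = col := by omega
            rw [hix2, List.getElem?_eq_getElem hlt]
            exact congrArg some (hcell.symm.trans hp)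
          rw [List.take_succ, hrun, hgt]
          simp [List.replicate_succ']
        rw [ih (col + 1) (count + 1) (by omega) hr (by omega) (by omega) (by omega) hrun']
        constructor
        · rintro ⟨s, hs, hw⟩; exact ⟨s, by omega, hw⟩
        · rintro ⟨s, hs, hw⟩; exact ⟨s, by omega, hw⟩
      · rw [if_neg hp]
        have hrun0 : (row.drop (col + 1 - 0)).take 0 = List.replicate 0 p := by simp
        rw [ih (col + 1) 0 (by omega) hr (by omega) (by omega) (by omega) hrun0]
        constructor
        · rintro ⟨s, hs, hw⟩; exact ⟨s, by omega, hw⟩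
        · rintro ⟨s, hs, hw⟩
          by_cases hs1 : col + 1 ≤ s
          · exact ⟨s, by omega, hw⟩
          · -- the window would cover column col, whose cell is not p: impossible
            exfalso
            have hi : col - s < r := by omega
            have hcp := winRow_cell hw hi
            have hsi : s + (col - s) = col := by omega
            rw [hsi, List.getElem?_eq_getElem hlt] at hcp
            exact hp (hcell.trans (Option.some.inj hcp))
    · rw [if_neg hguard]
      push_neg at hguard
      constructor
      · intro hc
        have hcr' : count = r := by exact_mod_cast hc
        exact ⟨col - count, le_refl _, by rw [← hcr']; exact hrun⟩
      · rintro ⟨s, hs, hw⟩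
        have hlen := winRow_len hr hw
        by_cases hce : count = r
        · exact_mod_cast congrArg (fun n => ((n : Nat) : Int)) hce
        · exfalso
          have h1 : (count : Int) < (r : Int) := by
            have : count < r := lt_of_le_of_ne hcr hce
            exact_mod_cast this
          rcases Nat.lt_or_ge col row.length with hc1 | hc1
          · have := hguard hc1 h1
            omega
          · omega

-- A's whole-row scan (on a row of length ≥ W) detects exactly a win inside the cropped row
lemma innerA_win_iff (r : Nat) (p : Int) (row : List Int) (W : Nat) (hr : 1 ≤ r)
    (hlen : W ≤ row.length) :
    (((pvInnerA (r : Int) p row W W 0 0 : Nat) : Int) = (r : Int) ↔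
      winRow r p (row.take W)) := by
  have hagree : ∀ c : Nat, c < W → row.getD c 0 = (row.take W).getD c 0 := by
    intro c hc
    have h1 : (row.take W)[c]? = row[c]? := by
      rw [List.getElem?_take, if_pos hc]
    simp [List.getD, h1]
  rw [innerA_congr (r : Int) p row (row.take W) W hagree]
  have hW : (row.take W).length = W := by
    rw [List.length_take]; omega
  rw [show (pvInnerA (r : Int) p (row.take W) W W 0 0) =
      (pvInnerA (r : Int) p (row.take W) (row.take W).length (row.take W).length 0 0) by
    rw [hW]]
  rw [innerA_iff r p (row.take W) (row.take W).length 0 0 (by omega) hr (by omega)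
    (by omega) (by omega) (by simp)]
  constructor
  · rintro ⟨s, _, hw⟩; exact ⟨s, hw⟩
  · rintro ⟨s, hw⟩; exact ⟨s, by omega, hw⟩

lemma outerA_iff (r : Nat) (p : Int) (grid : List (List Int)) (W : Nat)
    (hrect : ∀ row ∈ grid, W ≤ row.length) (hr : 1 ≤ r) :
    ∀ fuel rowIdx count : Nat, grid.length - rowIdx ≤ fuel → count ≤ r →
      (((pvOuterA (r : Int) p grid W grid.length fuel rowIdx count : Nat) : Int) = (r : Int) ↔
        (count = r ∨ ∃ i : Nat, rowIdx ≤ i ∧ i < grid.length ∧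
          winRow r p ((grid.getD i []).take W))) := by
  intro fuel
  induction fuel with
  | zero =>
    intro rowIdx count hf hc
    show ((count : Nat) : Int) = (r : Int) ↔ _
    constructor
    · intro h; left; exact_mod_cast h
    · rintro (h | ⟨i, h1, h2, _⟩)
      · exact_mod_cast congrArg (fun n => ((n : Nat) : Int)) h
      · omega
  | succ n ih =>
    intro rowIdx count hf hc
    rw [pvOuterA]
    by_cases hguard : rowIdx < grid.length ∧ (count : Int) < (r : Int)
    · rw [if_pos hguard]
      obtain ⟨hlt, hcr⟩ := hguard
      set row := grid.getD rowIdx [] with hrow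
      have hmem : row ∈ grid := by
        rw [hrow, List.getD_eq_getElem _ _ hlt]
        exact List.getElem_mem hlt
      have hinner := innerA_win_iff r p row W hr (hrect row hmem)
      have hle : ((pvInnerA (r : Int) p row W W 0 0 : Nat) : Int) ≤ (r : Int) :=
        innerA_le _ _ _ _ W 0 0 (by exact_mod_cast Int.natCast_nonneg r)
      have hcle : (pvInnerA (r : Int) p row W W 0 0 : Nat) ≤ r := by exact_mod_cast hle
      rw [ih (rowIdx + 1) _ (by omega) hcle]
      constructor
      · rintro (h | ⟨i, h1, h2, h3⟩)
        · right; exact ⟨rowIdx, le_refl _, hlt, hinner.mp (by exact_mod_cast h)⟩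
        · right; exact ⟨i, by omega, h2, h3⟩
      · rintro (h | ⟨i, h1, h2, h3⟩)
        · omega
        · by_cases hi : i = rowIdx
          · left
            have hwr : winRow r p (row.take W) := by rw [hrow, ← hi]; exact h3
            exact_mod_cast hinner.mpr hwr
          · right; exact ⟨i, by omega, h2, h3⟩
    · rw [if_neg hguard]
      push_neg at hguard
      constructor
      · intro h; left; exact_mod_cast h
      · rintro (h | ⟨i, h1, h2, _⟩)
        · exact_mod_cast congrArg (fun n => ((n : Nat) : Int)) h
        · have h4 := hguard (by omega)
          omega

-- if the loop guard's count test already fails, the outer loop returns count at once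
lemma outerA_notlt (rc p : Int) (grid : List (List Int)) (W H : Nat)
    (fuel rowIdx count : Nat) (h : ¬ (count : Int) < rc) :
    pvOuterA rc p grid W H fuel rowIdx count = count := by
  cases fuel with
  | zero => rfl
  | succ n => rw [pvOuterA, if_neg (fun hc => h hc.2)]

-- index-based existence over getD ↔ membership-based existence
lemma exists_idx_iff_mem (r W : Nat) (p : Int) (grid : List (List Int)) :
    (∃ i : Nat, i < grid.length ∧ winRow r p ((grid.getD i []).take W)) ↔
      ∃ row ∈ grid, winRow r p (row.take W) := by
  constructor
  · rintro ⟨i, hi, hw⟩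
    refine ⟨grid.getD i [], ?_, hw⟩
    rw [List.getD_eq_getElem _ _ hi]
    exact List.getElem_mem hi
  · rintro ⟨row, hmem, hw⟩
    obtain ⟨i, hi, hrow⟩ := List.mem_iff_getElem.mp hmem
    refine ⟨i, hi, ?_⟩
    rw [List.getD_eq_getElem _ _ hi, hrow]
    exact hw

-- B: the inner 'all' over any list of offsets
lemma allB_iff (row : List Int) (p s : Int) :
    ∀ l : List Int, (pvAllB row p s l = true ↔ ∀ i ∈ l, row.getD (s + i).toNat 0 = p) := by
  intro l
  induction l with
  | nil => simp [pvAllB]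
  | cons i rest ih =>
    rw [pvAllB]
    by_cases hp : row.getD (s + i).toNat 0 = p
    · rw [if_pos (beq_iff_eq.mpr hp)]
      simp only [ih, List.mem_cons]
      constructor
      · intro h j hj
        rcases hj with rfl | hj
        · exact hp
        · exact h j hj
      · intro h j hj; exact h j (Or.inr hj)
    · rw [if_neg (fun hc => hp (beq_iff_eq.mp hc))]
      simp only [Bool.false_eq_true, false_iff]
      intro h
      exact hp (h i (List.mem_cons_self))

-- B: the start loop returns true iff some start in the list gives a full window
lemma scanB_iff (row : List Int) (p rc : Int) :
    ∀ l : List Int, (pvScanStartsB row p rc l = true ↔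
      ∃ s ∈ l, pvAllB row p s (PySem.List.pyRange 0 rc 1) = true) := by
  intro l
  induction l with
  | nil => simp [pvScanStartsB]
  | cons s rest ih =>
    rw [pvScanStartsB]
    by_cases hs : pvAllB row p s (PySem.List.pyRange 0 rc 1) = true
    · rw [if_pos hs]
      simp only [true_iff]
      exact ⟨s, List.mem_cons_self, hs⟩
    · rw [if_neg hs, ih]
      constructor
      · rintro ⟨x, hx, hall⟩; exact ⟨x, List.mem_cons_of_mem _ hx, hall⟩
      · rintro ⟨x, hx, hall⟩
        rcases List.mem_cons.mp hx with rfl | hx'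
        · exact absurd hall hs
        · exact ⟨x, hx', hall⟩

-- B's scan of one row detects exactly a horizontal win inside the board's width
lemma rowCheckB_iff (row : List Int) (p : Int) (r W : Nat) (hr : 1 ≤ r)
    (hlen : W ≤ row.length) :
    (pvScanStartsB row p (r : Int)
        (PySem.List.pyRange 0 ((W : Int) - (r : Int) + 1) 1) = true ↔
      winRow r p (row.take W)) := by
  rw [scanB_iff]
  constructor
  · rintro ⟨s, hsmem, hall⟩
    rw [PySem.List.mem_pyRange_one] at hsmem
    obtain ⟨hs0, hslt⟩ := hsmem
    rw [allB_iff] at hall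
    refine ⟨s.toNat, ?_⟩
    have hsr : s.toNat + r ≤ W := by omega
    apply List.ext_getElem
    · simp [List.length_take, List.length_drop, List.length_replicate]
      omega
    · intro i h1 h2
      have hir : i < r := by
        simpa [List.length_replicate] using h2
      rw [List.getElem_take, List.getElem_drop, List.getElem_take, List.getElem_replicate]
      have hmem : (i : Int) ∈ PySem.List.pyRange 0 (r : Int) 1 := by
        rw [PySem.List.mem_pyRange_one]
        constructor
        · exact_mod_cast Int.natCast_nonneg i
        · exact_mod_cast hir
      have := hall (i : Int) hmem
      have hix : (s + (i : Int)).toNat = s.toNat + i := by omega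
      rw [hix] at this
      rw [← this, List.getD_eq_getElem]
  · rintro ⟨s, hw⟩
    have hWt : (row.take W).length = W := by
      rw [List.length_take]; omega
    have hlenw := winRow_len hr hw
    rw [hWt] at hlenw
    refine ⟨(s : Int), ?_, ?_⟩
    · rw [PySem.List.mem_pyRange_one]
      constructor
      · exact Int.natCast_nonneg s
      · omega
    · rw [allB_iff]
      intro i hi
      rw [PySem.List.mem_pyRange_one] at hi
      obtain ⟨hi0, hir⟩ := hi
      have hirn : i.toNat < r := by omega
      have hcp := winRow_cell hw hirn
      have hix : ((s : Int) + i).toNat = s + i.toNat := by omega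
      rw [hix]
      have hsw : s + i.toNat < W := by omega
      rw [List.getElem?_take, if_pos hsw] at hcp
      rw [List.getElem?_eq_some_iff] at hcp
      obtain ⟨hlt, hval⟩ := hcp
      rw [List.getD_eq_getElem _ _ hlt, hval]

-- B over the whole grid: returns p exactly on a win, 0 otherwise
lemma rowsB_cases (r W : Nat) (p : Int) (hr : 1 ≤ r) :
    ∀ grid : List (List Int), (∀ row ∈ grid, W ≤ row.length) →
      (pvRowsB (r : Int) p (PySem.List.pyRange 0 ((W : Int) - (r : Int) + 1) 1) grid = p ∧
        ∃ row ∈ grid, winRow r p (row.take W)) ∨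
      (pvRowsB (r : Int) p (PySem.List.pyRange 0 ((W : Int) - (r : Int) + 1) 1) grid = 0 ∧
        ¬ ∃ row ∈ grid, winRow r p (row.take W)) := by
  intro grid
  induction grid with
  | nil =>
    intro _
    right
    refine ⟨rfl, ?_⟩
    rintro ⟨row, hmem, _⟩
    exact absurd hmem (List.not_mem_nil)
  | cons row rest ih =>
    intro hlen
    have hrow : W ≤ row.length := hlen row List.mem_cons_self
    have hrest : ∀ x ∈ rest, W ≤ x.length :=
      fun x hx => hlen x (List.mem_cons_of_mem _ hx)
    rw [pvRowsB]
    by_cases hw : winRow r p (row.take W)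
    · left
      rw [if_pos ((rowCheckB_iff row p r W hr hrow).mpr hw)]
      exact ⟨rfl, row, List.mem_cons_self, hw⟩
    · rw [if_neg (fun hc => hw ((rowCheckB_iff row p r W hr hrow).mp hc))]
      rcases ih hrest with ⟨heq, hex⟩ | ⟨heq, hex⟩
      · left
        obtain ⟨x, hx, hwx⟩ := hex
        exact ⟨heq, x, List.mem_cons_of_mem _ hx, hwx⟩
      · right
        refine ⟨heq, ?_⟩
        rintro ⟨x, hx, hwx⟩
        rcases List.mem_cons.mp hx with rfl | hx'
        · exact hw hwx
        · exact hex ⟨x, hx', hwx⟩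

-- when required_coins exceeds the board width the inner loop never starts
lemma innerA_wide (rc p : Int) (row : List Int) (W : Nat) (h : (W : Int) < rc) :
    pvInnerA rc p row W W 0 0 = 0 := by
  cases W with
  | zero => rfl
  | succ w =>
    rw [pvInnerA, if_neg]
    rintro ⟨-, -, h3⟩
    omega

lemma outerA_wide (rc p : Int) (grid : List (List Int)) (W H : Nat) (h : (W : Int) < rc) :
    ∀ fuel rowIdx : Nat, pvOuterA rc p grid W H fuel rowIdx 0 = 0 := by
  intro fuel
  induction fuel with
  | zero => intro rowIdx; rfl
  | succ n ih =>
    intro rowIdx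
    rw [pvOuterA]
    by_cases hguard : rowIdx < H ∧ ((0 : Nat) : Int) < rc
    · rw [if_pos hguard, innerA_wide rc p _ W h]
      exact ih (rowIdx + 1)
    · rw [if_neg hguard]

-- with an empty start range B never matches anything
lemma rowsB_nil_starts (rc p : Int) :
    ∀ grid : List (List Int), pvRowsB rc p [] grid = 0 := by
  intro grid
  induction grid with
  | nil => rfl
  | cons row rest ih =>
    rw [pvRowsB, if_neg (by rw [pvScanStartsB]; simp)]
    exact ih

-- ===== VERDICT (by name: the statement is the Claim_ definition above) =====
theorem check_row_spec : Claim_equal_check_row := by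
  intro rc grid p _hdom hpre
  obtain ⟨hne, hnn, hpre2⟩ := hpre
  unfold Spec_check_row check_row check_row_alt
  obtain ⟨row0, rest, rfl⟩ : ∃ row rest, grid = row :: rest := by
    cases grid with
    | nil => exact absurd rfl hne
    | cons a l => exact ⟨a, l, rfl⟩
  set grid := row0 :: rest with hgrid
  set W := (grid.headD []).length with hWdef
  by_cases hzero : rc = 0
  · subst hzero
    rw [outerA_notlt 0 p grid W grid.length grid.length 0 0 (by omega),
      if_pos (by norm_num)]
    have hcons : PySem.List.pyRange 0 ((W : Int) - 0 + 1) 1 =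
        0 :: PySem.List.pyRange 1 ((W : Int) - 0 + 1) 1 := by
      rw [PySem.List.pyRange_one_cons (by omega)]
      norm_num
    rw [hcons, pvRowsB, pvScanStartsB,
      if_pos (by rw [show PySem.List.pyRange 0 (0 : Int) 1 = [] from rfl]; rfl)]
  · have hr : 1 ≤ rc.toNat := by omega
    set r := rc.toNat with hrdef
    have hrc : rc = (r : Int) := by omega
    rw [hrc]
    rcases Int.lt_or_le (W : Int) ((r : Nat) : Int) with hwide | hnarrow
    · -- required_coins exceeds the board width: both sides return 0
      rw [outerA_wide ((r : Nat) : Int) p grid W grid.length hwide grid.length 0,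
        if_neg (by push_cast; omega)]
      have hempty : PySem.List.pyRange 0 ((W : Int) - ((r : Nat) : Int) + 1) 1 = [] := by
        rw [PySem.List.pyRange_one]
        have : ((W : Int) - ((r : Nat) : Int) + 1 - 0).toNat = 0 := by omega
        rw [this]
        rfl
      rw [hempty, rowsB_nil_starts]
    · have hrect : ∀ row ∈ grid, W ≤ row.length := by
        rcases hpre2 with h | h
        · exact h
        · exact absurd hnarrow (by omega)
      have hiffA : (((pvOuterA ((r : Nat) : Int) p grid W grid.length grid.length 0 0 :
          Nat) : Int) = ((r : Nat) : Int)) ↔ ∃ row ∈ grid, winRow r p (row.take W) := by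
        rw [outerA_iff r p grid W hrect hr grid.length 0 0 (by omega) (by omega)]
        constructor
        · rintro (h | ⟨i, _, hi, hw⟩)
          · omega
          · exact (exists_idx_iff_mem r W p grid).mp ⟨i, hi, hw⟩
        · rintro hex
          right
          obtain ⟨i, hi, hw⟩ := (exists_idx_iff_mem r W p grid).mpr hex
          exact ⟨i, by omega, hi, hw⟩
      rcases rowsB_cases r W p hr grid hrect with ⟨heq, hex⟩ | ⟨heq, hex⟩
      · rw [heq, if_pos (hiffA.mpr hex)]
      · rw [heq, if_neg (fun hc => hex (hiffA.mp hc))]
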